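-- pv_equiv track=rewrite | github.com/Furina231013/Agent_lab | app/services/chunker.py | _preferred_end
-- ===== SOURCE A (Python) =====
-- def _preferred_end(boundaries: list[int], start: int, max_end: int) -> int:
--     chosen_boundary = 0
--     for boundary in boundaries:
--         if boundary > max_end:
--             break
--         if start < boundary <= max_end:
--             chosen_boundary = boundary
--     return chosen_boundary or max_end
-- ===== SOURCE B (Python) =====
-- def _preferred_end(boundaries: list[int], start: int, max_end: int) -> int:
--     # boundaries up to (excluding) the first one beyond max_end
--     eligible = []
--     for b in boundaries:
--         if b > max_end:
--             break
--         eligible.append(b)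
--     # largest qualifying boundary = first hit scanning backwards
--     for b in reversed(eligible):
--         if b > start:
--             return b
--     return max_end
-- ===== Notes on version B (the rewrite author's own statement) =====
-- stated objective: alternative
-- what changed: B splits the work: it collects the prefix before the first boundary > max_end once, then scans it backwards and returns at the FIRST qualifying boundary, instead of A's forward scan that keeps overwriting the last qualifying boundary and patches the result with a falsy-or.
-- intended difference: When the last boundary in (start, max_end] (within the prefix before the first boundary > max_end) is 0 and max_end != 0, A's falsy 'chosen_boundary or max_end' discards the legitimate boundary 0 and returns max_end, while B returns 0, the intended largest qualifying boundary. — e.g. on _preferred_end([0], -1, 5): A returns 5, B returns 0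
import Mathlib
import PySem

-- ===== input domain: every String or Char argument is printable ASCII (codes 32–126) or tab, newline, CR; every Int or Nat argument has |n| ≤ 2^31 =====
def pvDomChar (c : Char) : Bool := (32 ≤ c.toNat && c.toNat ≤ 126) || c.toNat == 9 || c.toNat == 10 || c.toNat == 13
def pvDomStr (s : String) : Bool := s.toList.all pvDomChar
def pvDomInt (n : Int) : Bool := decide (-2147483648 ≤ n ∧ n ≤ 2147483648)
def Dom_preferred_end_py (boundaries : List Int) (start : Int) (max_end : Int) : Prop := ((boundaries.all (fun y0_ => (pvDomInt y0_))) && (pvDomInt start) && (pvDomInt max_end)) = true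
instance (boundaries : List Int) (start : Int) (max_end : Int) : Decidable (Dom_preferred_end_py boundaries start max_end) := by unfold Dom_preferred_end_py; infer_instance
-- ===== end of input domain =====

-- B replaces A's forward overwrite-scan (with a falsy-or fixup) by a prefix-then-backward
-- scan with early exit; objective: alternative (same cost); B intentionally returns the
-- boundary 0 where A's falsy `or` drops it (see D_ below).

-- ===== PORT A =====
-- the for loop: state chosen_boundary, break on boundary > max_end
def pvLoopA (start max_end : Int) : List Int → Int → Int
  | [], c => c
  | b :: bs, c =>
    if b > max_end then c
    else if start < b ∧ b ≤ max_end then pvLoopA start max_end bs b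
    else pvLoopA start max_end bs c

def preferred_end_py (boundaries : List Int) (start : Int) (max_end : Int) : Int :=
  let chosen := pvLoopA start max_end boundaries 0
  -- 'chosen_boundary or max_end': 0 is falsy
  if chosen = 0 then max_end else chosen

-- ===== PORT B =====
-- first loop of Source B: build `eligible`, breaking at the first boundary > max_end
def pvEligible (max_end : Int) : List Int → List Int
  | [] => []
  | b :: bs => if b > max_end then [] else b :: pvEligible max_end bs

-- second loop of Source B: scan reversed(eligible), early return at the first b > start
def pvRevScan (start max_end : Int) : List Int → Int
  | [] => max_end
  | b :: bs => if b > start then b else pvRevScan start max_end bs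

def preferred_end_py_alt (boundaries : List Int) (start : Int) (max_end : Int) : Int :=
  pvRevScan start max_end (pvEligible max_end boundaries).reverse

-- ===== PRECONDITION & SPEC =====
-- On inputs whose last qualifying boundary (in the prefix before the first boundary > max_end,
-- lying in (start, max_end]) is 0 while max_end ≠ 0, A's falsy `chosen_boundary or max_end`
-- returns max_end, B returns 0 — the intended largest qualifying boundary.
def D_preferred_end_py (boundaries : List Int) (start : Int) (max_end : Int) : Prop :=
  max_end ≠ 0 ∧
    ((boundaries.takeWhile (fun b => decide (b ≤ max_end))).filter
        (fun b => decide (start < b))).getLast? = some 0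
instance (boundaries : List Int) (start : Int) (max_end : Int) : Decidable (D_preferred_end_py boundaries start max_end) := by unfold D_preferred_end_py; infer_instance

def Spec_preferred_end_py (boundaries : List Int) (start : Int) (max_end : Int) (out : Int) : Prop := ¬ D_preferred_end_py boundaries start max_end → out = preferred_end_py_alt boundaries start max_end
instance (boundaries : List Int) (start : Int) (max_end : Int) (out : Int) : Decidable (Spec_preferred_end_py boundaries start max_end out) := by unfold Spec_preferred_end_py; infer_instance

def pvDiffWitness_preferred_end_py : List Int × Int × Int := ([0], -1, 5)
def pvDiffWitnessOut_preferred_end_py : Int × Int := (5, 0)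

-- ===== CLAIM (what is proved, stated in full; the proofs are below) =====
def Claim_unchanged_preferred_end_py : Prop := ∀ (boundaries : List Int) (start : Int) (max_end : Int), Dom_preferred_end_py boundaries start max_end → Spec_preferred_end_py boundaries start max_end (preferred_end_py boundaries start max_end)
def Claim_changed_preferred_end_py : Prop := Dom_preferred_end_py (pvDiffWitness_preferred_end_py.1) (pvDiffWitness_preferred_end_py.2.1) (pvDiffWitness_preferred_end_py.2.2) ∧ D_preferred_end_py (pvDiffWitness_preferred_end_py.1) (pvDiffWitness_preferred_end_py.2.1) (pvDiffWitness_preferred_end_py.2.2) ∧ preferred_end_py (pvDiffWitness_preferred_end_py.1) (pvDiffWitness_preferred_end_py.2.1) (pvDiffWitness_preferred_end_py.2.2) = pvDiffWitnessOut_preferred_end_py.1 ∧ preferred_end_py_alt (pvDiffWitness_preferred_end_py.1) (pvDiffWitness_preferred_end_py.2.1) (pvDiffWitness_preferred_end_py.2.2) = pvDiffWitnessOut_preferred_end_py.2 ∧ pvDiffWitnessOut_preferred_end_py.1 ≠ pvDiffWitnessOut_preferred_end_py.2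
def Claim_exact_preferred_end_py : Prop := ∀ (boundaries : List Int) (start : Int) (max_end : Int), Dom_preferred_end_py boundaries start max_end → D_preferred_end_py boundaries start max_end → preferred_end_py boundaries start max_end ≠ preferred_end_py_alt boundaries start max_end

-- ===== LEMMAS AND PROOFS =====

theorem pvEligible_eq_takeWhile (max_end : Int) (bs : List Int) :
    pvEligible max_end bs = bs.takeWhile (fun b => decide (b ≤ max_end)) := by
  induction bs with
  | nil => rfl
  | cons b bs ih =>
    by_cases h : b > max_end
    · simp [pvEligible, h]
    · simp [pvEligible, h, (by omega : b ≤ max_end), ih]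

theorem getLastD_cons (l : List Int) : ∀ (a c : Int),
    ((a :: l).getLast?).getD c = (l.getLast?).getD a := by
  induction l with
  | nil => intro a c; rfl
  | cons b l ih => intro a c; rw [List.getLast?_cons_cons, ih, ih]

-- A's loop computes the last qualifying element of `eligible` (default: the accumulator)
theorem pvLoopA_eq (start max_end : Int) (bs : List Int) (c : Int) :
    pvLoopA start max_end bs c
      = (((pvEligible max_end bs).filter (fun b => decide (start < b))).getLast?).getD c := by
  induction bs generalizing c with
  | nil => rfl
  | cons b bs ih =>
    by_cases h : b > max_end
    · simp [pvLoopA, pvEligible, h]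
    · have hle : b ≤ max_end := by omega
      by_cases h2 : start < b
      · simp [pvLoopA, pvEligible, h, h2, hle, ih, getLastD_cons]
      · simp [pvLoopA, pvEligible, h, h2, hle, ih]

-- B's backward scan computes the same last qualifying element (default: max_end)
theorem pvRevScan_reverse (start max_end : Int) (p : List Int) :
    pvRevScan start max_end p.reverse
      = ((p.filter (fun b => decide (start < b))).getLast?).getD max_end := by
  induction p using List.reverseRecOn with
  | nil => rfl
  | append_singleton p b ih =>
    by_cases h : start < b
    · simp [List.reverse_append, pvRevScan, h, List.filter_append]
    · simp [List.reverse_append, pvRevScan, h, List.filter_append, ih]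

-- ===== VERDICT (by name: the statements are the Claim_ definitions above) =====
theorem preferred_end_py_spec : Claim_unchanged_preferred_end_py := by
  intro boundaries start max_end _ hD
  unfold D_preferred_end_py at hD
  unfold preferred_end_py preferred_end_py_alt
  rw [pvLoopA_eq, pvRevScan_reverse, pvEligible_eq_takeWhile]
  generalize ((boundaries.takeWhile (fun b => decide (b ≤ max_end))).filter
      (fun b => decide (start < b))).getLast? = L at hD ⊢
  cases L with
  | none => simp
  | some v =>
    by_cases hv : v = 0
    · subst hv
      have hme : max_end = 0 := by
        by_contra hne
        exact hD ⟨hne, rfl⟩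
      simp [hme]
    · simp [hv]

theorem preferred_end_py_changed : Claim_changed_preferred_end_py := by
  unfold Claim_changed_preferred_end_py; decide

theorem preferred_end_py_tight : Claim_exact_preferred_end_py := by
  intro boundaries start max_end _ hD
  unfold D_preferred_end_py at hD
  unfold preferred_end_py preferred_end_py_alt
  rw [pvLoopA_eq, pvRevScan_reverse, pvEligible_eq_takeWhile]
  rw [hD.2]
  simpa using hD.1
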